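/- GENERATED by mk_final_copies.py from the proof of the farm's unit `vorbis_decode_packet_rest.3c` (farm:vorbis_decode_packet_rest.3c.1: Proof.lean) as the
   re-elaboration sweep compiled it — do not edit. -/
import Vorbis.Spec.Units.vorbis_decode_packet_rest_3c
import Vorbis.Spec.Worked.vorbis_decode_packet_rest_3c_Lemmas

open X86 X86.User Asan Vorbis Vorbis.Spec Vorbis.Spec.vorbis_decode_packet_rest

/-- Unit `vorbis_decode_packet_rest.3c`: the translation step of DECODE (0x110fc2–0x110ffb: `if (c->sparse) var = c->sorted_values[var]`)
and `k = 0`, `[0x18] = g`, `[0] = cval` (0x110e60–0x110e6f), from the join 0x110fc2 (`At3Mid` and a DECODE_RAW result in r12d) to `At4`.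
The walk is `tail_reach` of Lemmas.lean (a dense and a sparse book). -/
theorem Vorbis.Spec.Worked.vorbis_decode_packet_rest_3c_ok : Vorbis.Spec.vorbis_decode_packet_rest_3c.Statement := by
  intro Lay hLay μ hμ u₀ hcode hl1 hl8 hl4
  intro others frames len Ar stored room mode ysz u ret i j v hat mb m hlt hmb hmid hres
  exact Vorbis.Spec.vorbis_decode_packet_rest_3c.tail_reach Lay hLay μ hμ u₀ hcode hl1 hl8 hl4 others frames len Ar stored room mode
    ysz u ret i j v hat mb m hlt hmb hmid hres
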